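-- pv_equiv track=rewrite | github.com/bilel-amri0/SkillSync | backend/ml_job_matcher.py | _find_matching_skills
-- ===== SOURCE A (Python) =====
-- from typing import Dict, List, Any, Tuple, Optional, Sequence
--
-- def _find_matching_skills(job_text: str, cv_skill_lookup: Dict[str, str]) -> List[str]:
--     if not cv_skill_lookup:
--         return []
--     text_lower = job_text.lower()
--     matches: List[str] = []
--     for skill_lower, original in cv_skill_lookup.items():
--         if skill_lower and skill_lower in text_lower:
--             matches.append(original)
--     return matches[:15]
-- ===== SOURCE B (Python) =====
-- def _find_matching_skills(job_text, cv_skill_lookup):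
--     text = job_text.lower()
--     by_first = {}
--     for sk in cv_skill_lookup:
--         if sk:
--             by_first.setdefault(sk[0], []).append(sk)
--     matched = set()
--     for i, ch in enumerate(text):
--         for sk in by_first.get(ch, ()):
--             if text.startswith(sk, i):
--                 matched.add(sk)
--     return [orig for sk, orig in cv_skill_lookup.items() if sk in matched][:15]
-- ===== Notes on version B (the rewrite author's own statement) =====
-- stated objective: alternative
-- what changed: B replaces A's per-skill built-in substring test ('skill in text') by a single position-driven scan of the text: skills are bucketed by first character once, each text position only tries the skills starting with that character, and the originals of matched skills are emitted in dict order at the end.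
import Mathlib
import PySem

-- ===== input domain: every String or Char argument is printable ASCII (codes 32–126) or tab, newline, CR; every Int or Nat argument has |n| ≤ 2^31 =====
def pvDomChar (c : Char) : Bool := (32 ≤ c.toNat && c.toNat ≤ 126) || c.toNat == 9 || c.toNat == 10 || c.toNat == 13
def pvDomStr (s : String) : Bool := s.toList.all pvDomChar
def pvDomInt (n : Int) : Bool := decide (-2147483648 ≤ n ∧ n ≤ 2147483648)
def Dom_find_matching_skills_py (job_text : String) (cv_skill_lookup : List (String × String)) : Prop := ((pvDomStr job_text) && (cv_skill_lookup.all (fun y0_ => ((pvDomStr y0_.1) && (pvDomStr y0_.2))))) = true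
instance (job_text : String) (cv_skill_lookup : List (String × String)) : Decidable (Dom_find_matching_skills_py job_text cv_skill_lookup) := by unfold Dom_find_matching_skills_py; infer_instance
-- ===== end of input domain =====

-- B replaces A's per-skill built-in substring search by one position-driven scan of the
-- text, with skills bucketed by their first character; same return value (alternative
-- decomposition, no speed claim).

-- ===== PORT A =====
def find_matching_skills_py (job_text : String) (cv_skill_lookup : List (String × String)) : List String :=
  if cv_skill_lookup = [] then []
  else
    let text_lower := PySem.Str.lower job_text
    let ms := cv_skill_lookup.foldl
      (fun acc p => if p.1 ≠ "" ∧ PySem.Str.isIn p.1 text_lower = true then acc ++ [p.2] else acc) []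
    PySem.List.slice ms none (some 15)

-- ===== PORT B =====
-- by_first = {}; for sk in cv: if sk: by_first.setdefault(sk[0], []).append(sk)
def pvBuckets (cv_skill_lookup : List (String × String)) : PySem.Dict Char (List String) :=
  cv_skill_lookup.foldl
    (fun d p =>
      match p.1.toList with
      | c :: _ => d.modify c [] (· ++ [p.1])
      | [] => d)
    PySem.Dict.empty

def find_matching_skills_py_alt (job_text : String) (cv_skill_lookup : List (String × String)) : List String :=
  let text := (PySem.Str.lower job_text).toList
  let by_first := pvBuckets cv_skill_lookup
  let matched : PySem.Set String :=
    (PySem.List.enumerate text 0).foldl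
      (fun s e => (by_first.getD e.2 []).foldl
        (fun s sk =>
          if PySem.Chars.startswith (text.drop e.1.toNat) sk.toList = true
          then PySem.Set.add s sk else s) s)
      PySem.Set.empty
  (cv_skill_lookup.foldl
    (fun acc p => if PySem.Set.contains matched p.1 then acc ++ [p.2] else acc) []).take 15

-- ===== PRECONDITION & SPEC =====
def Spec_find_matching_skills_py (job_text : String) (cv_skill_lookup : List (String × String)) (out : List String) : Prop := out = find_matching_skills_py_alt job_text cv_skill_lookup
instance (job_text : String) (cv_skill_lookup : List (String × String)) (out : List String) : Decidable (Spec_find_matching_skills_py job_text cv_skill_lookup out) := by unfold Spec_find_matching_skills_py; infer_instance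

-- ===== CLAIM (what is proved, stated in full; the proofs are below) =====
def Claim_equal_find_matching_skills_py : Prop := ∀ (job_text : String) (cv_skill_lookup : List (String × String)), Dom_find_matching_skills_py job_text cv_skill_lookup → Spec_find_matching_skills_py job_text cv_skill_lookup (find_matching_skills_py job_text cv_skill_lookup)

-- ===== LEMMAS AND PROOFS =====

-- s ≠ "" exactly when its character list is nonempty
lemma toList_ne_nil_of_ne_empty (s : String) (h : s ≠ "") : s.toList ≠ [] := by
  intro hnil; apply h; simpa using congrArg String.ofList hnil

-- the bucket-building fold is a grouping fold over the (first-char, skill) pairs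
lemma buckets_foldl (cv : List (String × String)) (d : PySem.Dict Char (List String)) :
    cv.foldl
      (fun d p =>
        match p.1.toList with
        | c :: _ => d.modify c [] (· ++ [p.1])
        | [] => d) d =
    (cv.filterMap (fun p => p.1.toList.head?.map (fun c => (c, p.1)))).foldl
      (fun d q => d.modify q.1 [] (· ++ [q.2])) d := by
  induction cv generalizing d with
  | nil => rfl
  | cons hd tl ih =>
    cases h : hd.1.toList with
    | nil => simp [h, ih]
    | cons c rest => simp [h, ih]

-- what ends up in the bucket of character c
lemma mem_bucket (cv : List (String × String)) (c : Char) (x : String) :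
    x ∈ (pvBuckets cv).getD c [] ↔ ∃ p ∈ cv, p.1 = x ∧ x.toList.head? = some c := by
  unfold pvBuckets
  rw [buckets_foldl, PySem.Dict.getD_foldl_modify_append, PySem.Dict.getD_empty]
  simp only [List.nil_append, List.mem_map, List.mem_filter, List.mem_filterMap,
    Option.map_eq_some_iff]
  constructor
  · rintro ⟨q, ⟨hq1, hq2⟩, rfl⟩
    obtain ⟨p, hp, c', hc', hq⟩ := hq1
    subst hq
    have hcc : c' = c := by simpa using hq2
    subst hcc
    exact ⟨p, hp, rfl, hc'⟩
  · rintro ⟨p, hp, rfl, hx⟩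
    exact ⟨(c, p.1), ⟨⟨p, hp, c, hx, rfl⟩, by simp⟩, rfl⟩

-- membership in the per-position fold over one bucket
lemma mem_add_fold (l : List String) (Q : String → Prop) [DecidablePred Q]
    (s0 : PySem.Set String) (x : String) :
    x ∈ l.foldl (fun s sk => if Q sk then PySem.Set.add s sk else s) s0 ↔
      x ∈ s0 ∨ (x ∈ l ∧ Q x) := by
  induction l generalizing s0 with
  | nil => simp
  | cons hd tl ih =>
    rw [List.foldl_cons, ih]
    by_cases hq : Q hd
    · rw [if_pos hq, PySem.Set.mem_add]
      constructor
      · rintro ((h | rfl) | h)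
        · exact Or.inl h
        · exact Or.inr ⟨List.mem_cons_self, hq⟩
        · exact Or.inr ⟨List.mem_cons_of_mem _ h.1, h.2⟩
      · rintro (h | ⟨hm, hqx⟩)
        · exact Or.inl (Or.inl h)
        · rcases List.mem_cons.mp hm with rfl | hm
          · exact Or.inl (Or.inr rfl)
          · exact Or.inr ⟨hm, hqx⟩
    · rw [if_neg hq]
      constructor
      · rintro (h | h)
        · exact Or.inl h
        · exact Or.inr ⟨List.mem_cons_of_mem _ h.1, h.2⟩
      · rintro (h | ⟨hm, hqx⟩)
        · exact Or.inl h
        · rcases List.mem_cons.mp hm with rfl | hm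
          · exact absurd hqx hq
          · exact Or.inr ⟨hm, hqx⟩

-- membership in the outer fold over the enumerated text
lemma mem_scan_fold (es : List (Int × Char)) (d : PySem.Dict Char (List String)) (text : List Char)
    (s0 : PySem.Set String) (x : String) :
    x ∈ es.foldl
        (fun s e => (d.getD e.2 []).foldl
          (fun s sk =>
            if PySem.Chars.startswith (text.drop e.1.toNat) sk.toList = true
            then PySem.Set.add s sk else s) s) s0 ↔
      x ∈ s0 ∨ ∃ e ∈ es, x ∈ d.getD e.2 [] ∧
        PySem.Chars.startswith (text.drop e.1.toNat) x.toList = true := by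
  induction es generalizing s0 with
  | nil => simp
  | cons hd tl ih =>
    rw [List.foldl_cons, ih, mem_add_fold]
    simp only [List.exists_mem_cons_iff]
    tauto

-- the matched set contains exactly the nonempty cv skills that occur in the text
lemma mem_matched (text : List Char) (cv : List (String × String)) (x : String) :
    x ∈ (PySem.List.enumerate text 0).foldl
        (fun s e => ((pvBuckets cv).getD e.2 []).foldl
          (fun s sk =>
            if PySem.Chars.startswith (text.drop e.1.toNat) sk.toList = true
            then PySem.Set.add s sk else s) s)
        PySem.Set.empty ↔
      (∃ p ∈ cv, p.1 = x) ∧ x ≠ "" ∧ PySem.Chars.isIn x.toList text = true := by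
  rw [mem_scan_fold]
  simp only [PySem.Set.empty, List.not_mem_nil, false_or]
  constructor
  · rintro ⟨e, he, hb, hsw⟩
    obtain ⟨k, hk, rfl⟩ := (PySem.List.mem_enumerate_iff _ _ _).mp he
    obtain ⟨p, hp, rfl, hhead⟩ := (mem_bucket cv _ x).mp hb
    have hne : p.1 ≠ "" := by
      intro h; rw [h] at hhead; simp at hhead
    refine ⟨⟨p, hp, rfl⟩, hne, ?_⟩
    rw [← PySem.Chars.exists_prefix_drop_iff_isIn]
    exact ⟨(0 + (k : Int)).toNat, (PySem.Chars.startswith_iff _ _).mp hsw⟩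
  · rintro ⟨⟨p, hp, rfl⟩, hne, hin⟩
    have hnil : p.1.toList ≠ [] := toList_ne_nil_of_ne_empty _ hne
    obtain ⟨j, hj⟩ := (PySem.Chars.exists_prefix_drop_iff_isIn _ _).mpr hin
    have hjlt : j < text.length := by
      by_contra h
      have hd : text.drop j = [] := List.drop_eq_nil_of_le (by omega)
      rw [hd] at hj
      exact hnil (List.prefix_nil.mp hj)
    refine ⟨(0 + (j : Int), text[j]), ?_, ?_, ?_⟩
    · exact (PySem.List.mem_enumerate_iff _ _ _).mpr ⟨j, hjlt, rfl⟩
    · refine (mem_bucket cv _ p.1).mpr ⟨p, hp, rfl, ?_⟩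
      cases hlist : p.1.toList with
      | nil => exact absurd hlist hnil
      | cons c rest =>
        rw [hlist] at hj
        have hhd : (text.drop j).head? = some c := by
          rcases hj with ⟨t, ht⟩
          rw [← ht]; rfl
        rw [List.head?_drop] at hhd
        simp only [List.getElem?_eq_getElem hjlt, Option.some.injEq] at hhd
        simp [hhd]
    · have : (0 + (j : Int)).toNat = j := by omega
      rw [this]
      exact (PySem.Chars.startswith_iff _ _).mpr hj

-- ===== VERDICT (by name: the statement is the Claim_ definition above) =====
theorem find_matching_skills_py_spec : Claim_equal_find_matching_skills_py := by
  intro job_text cv _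
  unfold Spec_find_matching_skills_py find_matching_skills_py find_matching_skills_py_alt
  by_cases hcv : cv = []
  · simp [hcv, pvBuckets]
  · simp only [if_neg hcv]
    have hsl : ∀ (l : List String), PySem.List.slice l none (some 15) = l.take 15 := by
      intro l; simp [pysem]
    rw [hsl]
    apply congrArg (List.take 15)
    apply PySem.List.foldl_congr_mem
    intro acc p hp
    have hcond : (p.1 ≠ "" ∧ PySem.Str.isIn p.1 (PySem.Str.lower job_text) = true) ↔
        PySem.Set.contains
          ((PySem.List.enumerate (PySem.Str.lower job_text).toList 0).foldl
            (fun s e => ((pvBuckets cv).getD e.2 []).foldl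
              (fun s sk =>
                if PySem.Chars.startswith ((PySem.Str.lower job_text).toList.drop e.1.toNat) sk.toList = true
                then PySem.Set.add s sk else s) s)
            PySem.Set.empty) p.1 = true := by
      rw [PySem.Set.contains_iff, mem_matched]
      rw [PySem.Str.isIn_iff_infix, ← PySem.Chars.isIn_iff_infix]
      constructor
      · rintro ⟨hne, hin⟩
        exact ⟨⟨p, hp, rfl⟩, hne, hin⟩
      · rintro ⟨-, hne, hin⟩
        exact ⟨hne, hin⟩
    simp only [hcond]
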